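-- pv_equiv track=rewrite | github.com/DGT-Network/PAMOLA | pamola_core/profiling/commons/mvf_utils.py | normalize_and_sort_value_counts
-- ===== SOURCE A (Python) =====
-- def normalize_and_sort_value_counts(value_counts: dict) -> dict:
--     """
--     Normalize the keys of a value_counts dictionary and sort them numerically if possible.
--
--     Args:
--         value_counts (dict): A dictionary where keys are values (may be str or int) and values are their counts.
--
--     Returns:
--         dict: A new dictionary with normalized keys, sorted by numeric order when applicable.
--     """
--     # Normalize keys: convert numeric strings like '01' to '1', keep others as str
--     counts_data = {
--         (str(int(k)) if str(k).isdigit() else str(k)): v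
--         for k, v in value_counts.items()
--     }
--
--     # Sort by numeric key if possible, else float('inf') to send to end
--     sorted_counts = dict(
--         sorted(
--             counts_data.items(),
--             key=lambda item: int(item[0]) if str(item[0]).isdigit() else float("inf"),
--         )
--     )
--     return sorted_counts
-- ===== SOURCE B (Python) =====
-- def normalize_and_sort_value_counts(value_counts: dict) -> dict:
--     """Same result as A: digit-string keys canonicalized and sorted ascending first,
--     non-numeric keys after them in encounter order. Instead of one sorted() call with
--     a float('inf') sentinel key, keep a list sorted at all times: walk the normalized
--     entries once, placing each numeric entry into its ordered position by an online
--     insertion (scan-and-insert) and appending non-numeric entries to a tail list."""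
--     norm = {}
--     for k, v in value_counts.items():
--         s = str(k)
--         norm[str(int(s)) if s.isdigit() else s] = v
--     nums = []    # [(int_value, key, count)] kept sorted by int_value via insertion
--     others = []  # non-numeric entries in encounter order
--     for key, v in norm.items():
--         if key.isdigit():
--             n = int(key)
--             i = 0
--             while i < len(nums) and nums[i][0] <= n:
--                 i += 1
--             nums.insert(i, (n, key, v))
--         else:
--             others.append((key, v))
--     result = {}
--     for _, key, v in nums:
--         result[key] = v
--     for key, v in others:
--         result[key] = v
--     return result
-- ===== Notes on version B (the rewrite author's own statement) =====
-- stated objective: alternative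
-- what changed: Replaces A's single library sort with a conditional float('inf') sentinel key by an online insertion sort: one pass over the normalized entries scan-inserts each numeric entry into a list kept sorted by its int value and appends non-numeric entries to a tail list, then the result dict is assembled from the two accumulators.
import Mathlib
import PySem

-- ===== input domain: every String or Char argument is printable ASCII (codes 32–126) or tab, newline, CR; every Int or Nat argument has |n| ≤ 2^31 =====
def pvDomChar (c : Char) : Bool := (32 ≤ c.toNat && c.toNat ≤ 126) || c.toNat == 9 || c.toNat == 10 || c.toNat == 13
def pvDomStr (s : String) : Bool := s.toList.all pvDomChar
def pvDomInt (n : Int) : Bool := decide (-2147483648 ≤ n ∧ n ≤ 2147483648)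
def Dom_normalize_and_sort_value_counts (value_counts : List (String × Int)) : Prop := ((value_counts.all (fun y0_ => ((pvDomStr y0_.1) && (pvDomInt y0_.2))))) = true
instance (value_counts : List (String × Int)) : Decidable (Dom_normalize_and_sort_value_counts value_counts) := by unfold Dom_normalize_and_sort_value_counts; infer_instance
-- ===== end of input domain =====

-- B replaces A's single library sort with a float('inf') sentinel key by an online insertion
-- sort: one pass over the normalized entries keeps the numeric entries in a list sorted by
-- scan-and-insert and appends the non-numeric entries to a tail list (objective: alternative).

-- ===== PORT A =====
-- float('inf') cannot be ported; the key 'int(k) if digit else inf' is modelled EXACTLY by the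
-- tuple key (0, int(k)) / (1, 0): inf is above every int, ints compare normally, ties are stable.
-- '.getD 0' never fires: int(k) succeeds whenever k.isdigit().
def normalize_and_sort_value_counts (value_counts : List (String × Int)) : List (String × Int) :=
  let counts_data : PySem.Dict String Int :=
    value_counts.foldl (fun d p =>
      d.insert (if PySem.Str.strIsdigit p.1 then PySem.Int.toStr ((PySem.Int.ofStr? p.1).getD 0) else p.1) p.2)
      PySem.Dict.empty
  let sorted_counts :=
    PySem.List.sorted2 counts_data.items
      (fun it => if PySem.Str.strIsdigit it.1 then (0 : Int) else 1)
      (fun it => if PySem.Str.strIsdigit it.1 then (PySem.Int.ofStr? it.1).getD 0 else 0)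
  (PySem.Dict.ofList sorted_counts).items

-- ===== PORT B =====
-- the while loop 'i = 0; while i < len(nums) and nums[i][0] <= n: i += 1', step for step
def pvScan (nums : List (Int × String × Int)) (n : Int) : Nat :=
  match nums with
  | [] => 0
  | t :: rest => if t.1 ≤ n then pvScan rest n + 1 else 0

def normalize_and_sort_value_counts_alt (value_counts : List (String × Int)) : List (String × Int) :=
  let norm : PySem.Dict String Int :=
    value_counts.foldl (fun d p =>
      d.insert (if PySem.Str.strIsdigit p.1 then PySem.Int.toStr ((PySem.Int.ofStr? p.1).getD 0) else p.1) p.2)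
      PySem.Dict.empty
  let st :=
    norm.items.foldl (fun st p =>
      if PySem.Str.strIsdigit p.1 then
        let n := (PySem.Int.ofStr? p.1).getD 0
        (PySem.List.insert st.1 ((pvScan st.1 n : Nat) : Int) (n, p.1, p.2), st.2)
      else (st.1, st.2 ++ [p]))
      (([] : List (Int × String × Int)), ([] : List (String × Int)))
  let result := st.1.foldl (fun d t => d.insert t.2.1 t.2.2) (PySem.Dict.empty : PySem.Dict String Int)
  let result := st.2.foldl (fun d p => d.insert p.1 p.2) result
  result.items

-- ===== PRECONDITION & SPEC =====
def Spec_normalize_and_sort_value_counts (value_counts : List (String × Int)) (out : List (String × Int)) : Prop := out = normalize_and_sort_value_counts_alt value_counts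
instance (value_counts : List (String × Int)) (out : List (String × Int)) : Decidable (Spec_normalize_and_sort_value_counts value_counts out) := by unfold Spec_normalize_and_sort_value_counts; infer_instance

-- ===== CLAIM (what is proved, stated in full; the proofs are below) =====
def Claim_equal_normalize_and_sort_value_counts : Prop := ∀ (value_counts : List (String × Int)), Dom_normalize_and_sort_value_counts value_counts → Spec_normalize_and_sort_value_counts value_counts (normalize_and_sort_value_counts value_counts)

-- ===== LEMMAS AND PROOFS =====

-- A's comparator (the tuple key of sorted2, spelled out)
def pvCmp (a b : String × Int) : Bool :=
  decide ((if PySem.Str.strIsdigit a.1 then (0 : Int) else 1) < (if PySem.Str.strIsdigit b.1 then (0 : Int) else 1)) ||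
  (!decide ((if PySem.Str.strIsdigit b.1 then (0 : Int) else 1) < (if PySem.Str.strIsdigit a.1 then (0 : Int) else 1)) &&
   decide ((if PySem.Str.strIsdigit a.1 then (PySem.Int.ofStr? a.1).getD 0 else 0) < (if PySem.Str.strIsdigit b.1 then (PySem.Int.ofStr? b.1).getD 0 else 0)))

def pvProj (t : Int × String × Int) : String × Int := (t.2.1, t.2.2)

-- B's scan-and-insert as a structural ordered insert
def pvIns (x : Int × String × Int) : List (Int × String × Int) → List (Int × String × Int)
  | [] => [x]
  | t :: r => if t.1 ≤ x.1 then t :: pvIns x r else x :: t :: r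

def pvStep (st : List (Int × String × Int) × List (String × Int)) (p : String × Int) :
    List (Int × String × Int) × List (String × Int) :=
  if PySem.Str.strIsdigit p.1 then
    (PySem.List.insert st.1 ((pvScan st.1 ((PySem.Int.ofStr? p.1).getD 0) : Nat) : Int)
      (((PySem.Int.ofStr? p.1).getD 0), p.1, p.2), st.2)
  else (st.1, st.2 ++ [p])

lemma pvScan_le (N : List (Int × String × Int)) (n : Int) : pvScan N n ≤ N.length := by
  induction N with
  | nil => simp [pvScan]
  | cons t r ih => by_cases h : t.1 ≤ n <;> simp [pvScan, h]; omega

lemma insert_scan_eq (N : List (Int × String × Int)) (n : Int) (k : String) (v : Int) :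
    PySem.List.insert N ((pvScan N n : Nat) : Int) (n, k, v) = pvIns (n, k, v) N := by
  induction N with
  | nil => simp [pvScan, PySem.List.insert_zero, pvIns]
  | cons t r ih =>
    by_cases h : t.1 ≤ n
    · rw [PySem.List.insert_natCast _ _ _ (pvScan_le (t :: r) n)]
      simp only [pvScan, h, if_pos, pvIns]
      rw [← ih, PySem.List.insert_natCast _ _ _ (pvScan_le r n)]
      simp
    · rw [PySem.List.insert_natCast _ _ _ (pvScan_le (t :: r) n)]
      simp [pvScan, h, pvIns]

lemma mem_pvIns (x y : Int × String × Int) (N : List (Int × String × Int)) :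
    y ∈ pvIns x N ↔ y = x ∨ y ∈ N := by
  induction N with
  | nil => simp [pvIns]
  | cons t r ih => by_cases h : t.1 ≤ x.1 <;> simp [pvIns, h, ih]; tauto

lemma map_pvIns (x : Int × String × Int) (N : List (Int × String × Int))
    (hx : PySem.Str.strIsdigit x.2.1 = true ∧ (PySem.Int.ofStr? x.2.1).getD 0 = x.1)
    (hN : ∀ t ∈ N, PySem.Str.strIsdigit t.2.1 = true ∧ (PySem.Int.ofStr? t.2.1).getD 0 = t.1) :
    (pvIns x N).map pvProj = PySem.List.insertBy pvCmp (pvProj x) (N.map pvProj) := by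
  induction N with
  | nil => simp [pvIns, PySem.List.insertBy]
  | cons t r ih =>
    have ht := hN t (by simp)
    have hxd : PySem.Chars.strIsdigit x.2.1.toList = true := by simpa using hx.1
    have htd : PySem.Chars.strIsdigit t.2.1.toList = true := by simpa using ht.1
    have hcmp : pvCmp x.2 t.2 = decide (x.1 < t.1) := by
      simp [pvCmp, hxd, htd, hx.2, ht.2]
    by_cases h : t.1 ≤ x.1
    · have hc : pvCmp x.2 t.2 = false := by rw [hcmp]; simpa using not_lt.2 h
      simp only [pvIns, if_pos h, List.map_cons]
      rw [ih (fun u hu => hN u (by simp [hu]))]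
      simp [PySem.List.insertBy, pvProj, hc]
    · have hc : pvCmp x.2 t.2 = true := by rw [hcmp]; simpa using lt_of_not_ge h
      simp [pvIns, if_neg h, PySem.List.insertBy, pvProj, hc]

-- state invariant of B's partition fold
lemma pvStep_inv (l : List (String × Int)) :
    (∀ t ∈ (l.foldl pvStep ([], [])).1, PySem.Str.strIsdigit t.2.1 = true ∧ (PySem.Int.ofStr? t.2.1).getD 0 = t.1) ∧
    (∀ p ∈ (l.foldl pvStep ([], [])).2, PySem.Str.strIsdigit p.1 = false) := by
  induction l using List.reverseRecOn with
  | nil => simp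
  | append_singleton l x ih =>
    rw [List.foldl_append, List.foldl_cons, List.foldl_nil]
    by_cases hx : PySem.Str.strIsdigit x.1
    · constructor
      · intro t ht
        simp only [pvStep, hx, if_pos] at ht
        rw [insert_scan_eq] at ht
        rcases (mem_pvIns _ _ _).1 ht with rfl | ht
        · exact ⟨hx, rfl⟩
        · exact ih.1 t ht
      · intro p hp
        simp only [pvStep, hx, if_pos] at hp
        exact ih.2 p hp
    · constructor
      · intro t ht
        simp only [pvStep, hx, if_neg, Bool.false_eq_true, not_false_iff] at ht
        exact ih.1 t ht
      · intro p hp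
        simp only [pvStep, hx, if_neg, Bool.false_eq_true, not_false_iff, List.mem_append, List.mem_singleton] at hp
        rcases hp with hp | rfl
        · exact ih.2 p hp
        · simpa using hx

-- inserting an element that goes before every element of the suffix B inserts into the prefix A
lemma insertBy_append_of_before {α : Type} (before : α → α → Bool) (x : α) (A B : List α)
    (h : ∀ y ∈ B, before x y = true) :
    PySem.List.insertBy before x (A ++ B) = PySem.List.insertBy before x A ++ B := by
  induction A with
  | nil =>
    cases B with
    | nil => simp [PySem.List.insertBy]
    | cons b B' => simp [PySem.List.insertBy, h b (by simp)]
  | cons a A' ih =>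
    by_cases hxa : before x a
    · simp [PySem.List.insertBy, hxa]
    · simp [PySem.List.insertBy, hxa, ih]

-- the heart: A's stable sort with the sentinel tuple key = B's online partition/insertion fold
set_option maxHeartbeats 1600000 in
lemma sort_eq_fold (l : List (String × Int)) :
    PySem.List.sorted2 l
      (fun it => if PySem.Str.strIsdigit it.1 then (0 : Int) else 1)
      (fun it => if PySem.Str.strIsdigit it.1 then (PySem.Int.ofStr? it.1).getD 0 else 0)
    = (l.foldl pvStep ([], [])).1.map pvProj ++ (l.foldl pvStep ([], [])).2 := by
  induction l using List.reverseRecOn with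
  | nil => rfl
  | append_singleton l x ih =>
    have hs2 : PySem.List.sorted2 (l ++ [x])
          (fun it => if PySem.Str.strIsdigit it.1 then (0 : Int) else 1)
          (fun it => if PySem.Str.strIsdigit it.1 then (PySem.Int.ofStr? it.1).getD 0 else 0)
        = PySem.List.insertBy pvCmp x
            (PySem.List.sorted2 l
              (fun it => if PySem.Str.strIsdigit it.1 then (0 : Int) else 1)
              (fun it => if PySem.Str.strIsdigit it.1 then (PySem.Int.ofStr? it.1).getD 0 else 0)) := by
      unfold PySem.List.sorted2
      rw [List.foldl_append, List.foldl_cons, List.foldl_nil]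
      rfl
    rw [hs2, ih, List.foldl_append, List.foldl_cons, List.foldl_nil]
    obtain ⟨hNinv, hOinv⟩ := pvStep_inv l
    by_cases hx : PySem.Str.strIsdigit x.1
    · have hxd : PySem.Chars.strIsdigit x.1.toList = true := by simpa using hx
      rw [insertBy_append_of_before pvCmp x _ _ (by
        intro y hy
        have hyd : PySem.Chars.strIsdigit y.1.toList = false := by simpa using hOinv y hy
        simp [pvCmp, hxd, hyd])]
      simp only [pvStep, hx, if_pos]
      rw [insert_scan_eq, map_pvIns _ _ ⟨hx, rfl⟩ hNinv]
      rfl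
    · have hxd : PySem.Chars.strIsdigit x.1.toList = false := by simpa using hx
      rw [PySem.List.insertBy_of_forall_not_before pvCmp x _ (by
        intro y hy
        rcases List.mem_append.1 hy with hyN | hyO
        · obtain ⟨t, htN, rfl⟩ := List.mem_map.1 hyN
          have htd : PySem.Chars.strIsdigit t.2.1.toList = true := by simpa using (hNinv t htN).1
          simp [pvCmp, pvProj, hxd, htd]
        · have hyd : PySem.Chars.strIsdigit y.1.toList = false := by simpa using hOinv y hyO
          simp [pvCmp, hxd, hyd])]
      simp only [pvStep, hx, if_neg, Bool.false_eq_true, not_false_iff]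
      rw [List.append_assoc]

-- B's two result-building folds assemble exactly dict(numeric-entries ++ other-entries)
lemma dict_assemble (N : List (Int × String × Int)) (O : List (String × Int)) :
    O.foldl (fun (d : PySem.Dict String Int) p => d.insert p.1 p.2)
      (N.foldl (fun d t => d.insert t.2.1 t.2.2) PySem.Dict.empty)
    = PySem.Dict.ofList (N.map pvProj ++ O) := by
  rw [show PySem.Dict.ofList (N.map pvProj ++ O)
      = (N.map pvProj ++ O).foldl (fun (d : PySem.Dict String Int) p => d.insert p.1 p.2) PySem.Dict.empty from rfl]
  rw [List.foldl_append, List.foldl_map]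
  rfl

-- ===== VERDICT (by name: the statement is the Claim_ definition above) =====
set_option maxHeartbeats 1600000 in
theorem normalize_and_sort_value_counts_spec : Claim_equal_normalize_and_sort_value_counts := by
  intro value_counts _
  unfold Spec_normalize_and_sort_value_counts
  unfold normalize_and_sort_value_counts normalize_and_sort_value_counts_alt
  simp only []
  rw [show (fun (st : List (Int × String × Int) × List (String × Int)) (p : String × Int) =>
        if PySem.Str.strIsdigit p.1 then
          (PySem.List.insert st.1 ((pvScan st.1 ((PySem.Int.ofStr? p.1).getD 0) : Nat) : Int)
            (((PySem.Int.ofStr? p.1).getD 0), p.1, p.2), st.2)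
        else (st.1, st.2 ++ [p])) = pvStep from rfl]
  rw [sort_eq_fold, dict_assemble]
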